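-- pv_equiv track=rewrite | github.com/sgerding17/galaxy-stats | scripts/stats.py | has_upcoming_freethrow
-- ===== SOURCE A (Python) =====
-- def has_upcoming_freethrow(upcoming_events, player):
--     if not upcoming_events:
--         return False
--     if upcoming_events[0] in (["fta", player], ["ftm", player]):
--         return True
--     if upcoming_events[0][0] in ("c", "ig", "a"):
--         return has_upcoming_freethrow(upcoming_events[1:], player)
--     return False
-- ===== SOURCE B (Python) =====
-- def has_upcoming_freethrow(upcoming_events, player):
--     targets = (["fta", player], ["ftm", player])
--     i = 0
--     n = len(upcoming_events)
--     while i < n and upcoming_events[i] not in targets: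
--         ev = upcoming_events[i]
--         if not ev or ev[0] not in ("c", "ig", "a"):
--             return False
--         i += 1
--     return i < n
-- ===== Notes on version B (the rewrite author's own statement) =====
-- stated objective: alternative
-- what changed: replaces the recursion that copies the tail with upcoming_events[1:] at every step by a single iterative index-pointer while loop over the original list (no slicing, no recursion)
import Mathlib
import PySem

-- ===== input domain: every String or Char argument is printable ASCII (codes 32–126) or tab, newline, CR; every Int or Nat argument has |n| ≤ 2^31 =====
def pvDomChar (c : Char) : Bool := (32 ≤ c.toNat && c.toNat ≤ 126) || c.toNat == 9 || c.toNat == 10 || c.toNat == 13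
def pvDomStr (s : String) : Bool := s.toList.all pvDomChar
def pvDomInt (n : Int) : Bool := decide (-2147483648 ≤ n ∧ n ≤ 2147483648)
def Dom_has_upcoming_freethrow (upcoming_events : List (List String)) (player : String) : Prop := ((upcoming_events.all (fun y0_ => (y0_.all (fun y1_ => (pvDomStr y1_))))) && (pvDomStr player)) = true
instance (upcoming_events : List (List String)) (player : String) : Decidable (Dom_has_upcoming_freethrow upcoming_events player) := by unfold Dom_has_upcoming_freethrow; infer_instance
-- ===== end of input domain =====

-- B replaces A's recursion on copied tails (upcoming_events[1:]) by a single index-pointer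
-- while loop over the original list; Pre_ excludes exactly the inputs where A raises IndexError.


-- ===== PORT A =====
-- literal transliteration of A's recursion; upcoming_events[0][0] on an empty event
-- raises IndexError in Python: that case (head? = none) is excluded by Pre_ below.
def has_upcoming_freethrow (upcoming_events : List (List String)) (player : String) : Bool :=
  match upcoming_events with
  | [] => false
  | e :: rest =>
    if e = ["fta", player] ∨ e = ["ftm", player] then true
    else
      match e.head? with
      | none => false  -- Python raises IndexError here; outside Pre_
      | some c =>
        if c = "c" ∨ c = "ig" ∨ c = "a" then has_upcoming_freethrow rest player
        else false

-- ===== PORT B =====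
-- the while loop of Source B: an index pointer i over the unchanged list
def pvAltLoop (upcoming_events : List (List String)) (player : String) (i : Nat) : Bool :=
  if h : i < upcoming_events.length then
    if upcoming_events[i] = ["fta", player] ∨ upcoming_events[i] = ["ftm", player] then
      true  -- loop guard fails with i < n: 'return i < n' yields True
    else if upcoming_events[i] = [] ∨
        ¬(upcoming_events[i].head? = some "c" ∨ upcoming_events[i].head? = some "ig" ∨
          upcoming_events[i].head? = some "a") then false
    else pvAltLoop upcoming_events player (i + 1)
  else false  -- loop guard fails with i = n: 'return i < n' yields False
termination_by upcoming_events.length - i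

def has_upcoming_freethrow_alt (upcoming_events : List (List String)) (player : String) : Bool :=
  pvAltLoop upcoming_events player 0

-- ===== PRECONDITION & SPEC =====
-- does event e continue the scan (not a matching free throw, first entry a chaining code)?
def pvChain (e : List String) (player : String) : Bool :=
  e ≠ ["fta", player] && e ≠ ["ftm", player] &&
  (e.head? == some "c" || e.head? == some "ig" || e.head? == some "a")

-- Pre_ excludes exactly the inputs on which A raises IndexError: an empty event list
-- reached after a prefix of chaining non-matching events.
def Pre_has_upcoming_freethrow (upcoming_events : List (List String)) (player : String) : Prop :=
  ∀ i, i < upcoming_events.length →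
    (∀ j, j < i → pvChain (upcoming_events.getD j []) player = true) →
    upcoming_events.getD i [] ≠ []
instance (upcoming_events : List (List String)) (player : String) : Decidable (Pre_has_upcoming_freethrow upcoming_events player) := by unfold Pre_has_upcoming_freethrow; infer_instance

def pvWitness_has_upcoming_freethrow : List (List String) × String := ([["c", "x"], ["fta", "p"]], "p")

def Spec_has_upcoming_freethrow (upcoming_events : List (List String)) (player : String) (out : Bool) : Prop := out = has_upcoming_freethrow_alt upcoming_events player
instance (upcoming_events : List (List String)) (player : String) (out : Bool) : Decidable (Spec_has_upcoming_freethrow upcoming_events player out) := by unfold Spec_has_upcoming_freethrow; infer_instance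

-- ===== CLAIM (what is proved, stated in full; the proofs are below) =====
def Claim_equal_has_upcoming_freethrow : Prop := ∀ (upcoming_events : List (List String)) (player : String), Dom_has_upcoming_freethrow upcoming_events player → Pre_has_upcoming_freethrow upcoming_events player → Spec_has_upcoming_freethrow upcoming_events player (has_upcoming_freethrow upcoming_events player)

-- ===== LEMMAS AND PROOFS =====

theorem pvAltLoop_stop (events : List (List String)) (player : String) (i : Nat)
    (h : ¬ i < events.length) : pvAltLoop events player i = false := by
  rw [pvAltLoop]
  simp [h]

-- shifting the index pointer past a cons
theorem pvAltLoop_shift (e : List String) (player : String) :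
    ∀ k (rest : List (List String)) (i : Nat), rest.length - i ≤ k →
      pvAltLoop (e :: rest) player (i + 1) = pvAltLoop rest player i := by
  intro k
  induction k with
  | zero =>
    intro rest i h
    have h1 : ¬ i < rest.length := by omega
    have h2 : ¬ i + 1 < (e :: rest).length := by simp only [List.length_cons]; omega
    rw [pvAltLoop_stop _ _ _ h1, pvAltLoop_stop _ _ _ h2]
  | succ k ih =>
    intro rest i h
    by_cases hi : i < rest.length
    · have hi' : i + 1 < (e :: rest).length := by simp only [List.length_cons]; omega
      conv_lhs => rw [pvAltLoop]
      conv_rhs => rw [pvAltLoop]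
      simp only [hi', hi, dif_pos, List.getElem_cons_succ]
      split_ifs with h1 h2
      · rfl
      · rfl
      · exact ih rest (i + 1) (by omega)
    · have h1 : ¬ i + 1 < (e :: rest).length := by simp only [List.length_cons]; omega
      rw [pvAltLoop_stop _ _ _ h1, pvAltLoop_stop _ _ _ hi]

theorem pre_tail (e : List String) (rest : List (List String)) (player : String)
    (hpre : Pre_has_upcoming_freethrow (e :: rest) player)
    (hc : pvChain e player = true) :
    Pre_has_upcoming_freethrow rest player := by
  intro i hi hchain
  have := hpre (i + 1) (by simp only [List.length_cons]; omega)
  simp only [List.getD_cons_succ] at this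
  apply this
  intro j hj
  match j with
  | 0 => simpa using hc
  | j + 1 =>
    simp only [List.getD_cons_succ]
    exact hchain j (by omega)

theorem main_equiv : ∀ (upcoming_events : List (List String)) (player : String),
    Pre_has_upcoming_freethrow upcoming_events player →
    has_upcoming_freethrow upcoming_events player = has_upcoming_freethrow_alt upcoming_events player := by
  intro events player
  induction events with
  | nil =>
    intro _
    rw [has_upcoming_freethrow, has_upcoming_freethrow_alt, pvAltLoop_stop]
    simp
  | cons e rest ih =>
    intro hpre
    have hne : e ≠ [] := by
      have := hpre 0 (by simp only [List.length_cons]; omega) (by intro j hj; omega)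
      simpa using this
    obtain ⟨eh, et, rfl⟩ : ∃ eh et, e = eh :: et := by
      cases e with
      | nil => exact absurd rfl hne
      | cons a b => exact ⟨a, b, rfl⟩
    unfold has_upcoming_freethrow_alt
    by_cases hm : (eh :: et : List String) = ["fta", player] ∨ (eh :: et : List String) = ["ftm", player]
    · have hB : pvAltLoop ((eh :: et) :: rest) player 0 = true := by
        rw [pvAltLoop]
        simp only [List.length_cons, Nat.succ_pos, dif_pos, List.getElem_cons_zero]
        rw [if_pos hm]
      rw [has_upcoming_freethrow, if_pos hm, hB]
    · by_cases hch : eh = "c" ∨ eh = "ig" ∨ eh = "a"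
      · have hhead : ¬ (((eh :: et) : List String) = [] ∨
            ¬(((eh :: et) : List String).head? = some "c" ∨ ((eh :: et) : List String).head? = some "ig" ∨
              ((eh :: et) : List String).head? = some "a")) := by
          simp only [List.head?_cons, Option.some.injEq]
          push Not
          exact ⟨by simp, hch⟩
        have hB : pvAltLoop ((eh :: et) :: rest) player 0 = pvAltLoop rest player 0 := by
          conv_lhs => rw [pvAltLoop]
          simp only [List.length_cons, Nat.succ_pos, dif_pos, List.getElem_cons_zero,
            hm, if_false, hhead]
          exact pvAltLoop_shift (eh :: et) player rest.length rest 0 (by omega)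
        have hA : has_upcoming_freethrow ((eh :: et) :: rest) player =
            has_upcoming_freethrow rest player := by
          rw [has_upcoming_freethrow]
          simp only [hm, if_false, List.head?_cons]
          rw [if_pos hch]
        have hchain : pvChain (eh :: et) player = true := by
          simp only [pvChain, Bool.and_eq_true, decide_eq_true_eq, Bool.or_eq_true, beq_iff_eq,
            List.head?_cons, Option.some.injEq]
          exact ⟨⟨fun h => hm (Or.inl h), fun h => hm (Or.inr h)⟩,
            by rcases hch with h | h | h <;> simp [h]⟩
        rw [hA, hB]
        exact ih (pre_tail _ _ _ hpre hchain)
      · have hhead : (((eh :: et) : List String) = [] ∨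
            ¬(((eh :: et) : List String).head? = some "c" ∨ ((eh :: et) : List String).head? = some "ig" ∨
              ((eh :: et) : List String).head? = some "a")) := by
          right
          simpa using hch
        have hB : pvAltLoop ((eh :: et) :: rest) player 0 = false := by
          rw [pvAltLoop]
          simp only [List.length_cons, Nat.succ_pos, dif_pos, List.getElem_cons_zero]
          rw [if_neg hm, if_pos hhead]
        have hA : has_upcoming_freethrow ((eh :: et) :: rest) player = false := by
          rw [has_upcoming_freethrow]
          simp only [List.head?_cons]
          rw [if_neg hm, if_neg hch]
        rw [hA, hB]

-- ===== VERDICT (by name: the statement is the Claim_ definition above) =====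
theorem has_upcoming_freethrow_spec : Claim_equal_has_upcoming_freethrow := by
  intro events player _ hpre
  unfold Spec_has_upcoming_freethrow
  exact main_equiv events player hpre
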